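-- pv_equiv track=rewrite | github.com/Mrzhouxf/Master_code | Interconnect/squeue_optimized.py | block_mapping
-- ===== SOURCE A (Python) =====
-- import math
--
-- def convert_to_mesh_layout(input_lists,mesh_size):
--     """
--     将输入的列表转换为4x4网格布局的字典
--
--     参数:
--         input_lists: 包含3个子列表的列表，每个子列表对应一个芯片的资源块
--
--     返回:
--         字典，键为芯片编号(0,1,2)，值为4x4的二维数组
--     """
--     total_elements = mesh_size * mesh_size  # 16个元素
--     result = {}
--
--     for chip_id, layer_list in enumerate(input_lists):
--         # 确保列表长度为16，不足则用0填充
--         padded_list = layer_list.copy()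
--         if len(padded_list) < total_elements:
--             padded_list += [0] * (total_elements - len(padded_list))
--
--         # 转换为4x4二维数组（每4个元素一行）
--         mesh_layout = []
--         for i in range(mesh_size):
--             start_idx = i * mesh_size
--             end_idx = start_idx + mesh_size
--             row = padded_list[start_idx:end_idx]
--             mesh_layout.append(row)
--
--         result[chip_id] = mesh_layout
--
--     return result
--
-- def block_mapping(mapping,mesh):
--
--
--     all_chip = []
--     chip = []
--     for i in range(len(mapping)):
--         for resourece in range(mapping[i][2]):
--             chip.append(i+1)
--
--     num_tile = mesh*mesh
--
--     num_chip = math.ceil(len(chip)/num_tile)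
--
--     for j in range(num_chip):
--         if j == num_chip - 1:
--             all_chip.append(chip[j*num_tile:])
--
--         else:
--             all_chip.append(chip[j*num_tile:(j+1)*num_tile])
--
--     input_layout = convert_to_mesh_layout(all_chip,mesh)
--
--
--     return input_layout, all_chip
-- ===== SOURCE B (Python) =====
-- def block_mapping(mapping, mesh):
--     # Streaming pass: feed cells one at a time into row/grid/tile accumulators,
--     # flushing a tile (and its grid) whenever mesh*mesh cells have been consumed.
--     num_tile = mesh * mesh
--     cells = [(i + 1, True) for i, r in enumerate(mapping) for _ in range(r[2])]
--     cells += [(0, False)] * ((-len(cells)) % num_tile)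
--     input_layout, all_chip = {}, []
--     tile, grid, row = [], [], []
--     j = c = 0
--     for v, real in cells:
--         if real:
--             tile.append(v)
--         row.append(v)
--         if len(row) == mesh:
--             grid.append(row)
--             row = []
--         c += 1
--         if c == num_tile:
--             input_layout[j] = grid
--             all_chip.append(tile)
--             j += 1
--             tile, grid, row = [], [], []
--             c = 0
--     return input_layout, all_chip
-- ===== Notes on version B (the rewrite author's own statement) =====
-- stated objective: alternative
-- what changed: Replaces A's materialize-then-slice-then-reshape pipeline (slice chip into tiles, then pad and slice each tile into rows) by a single streaming pass that feeds padded cells one at a time into row/grid/tile accumulators, flushing a tile and its grid each time mesh*mesh cells are consumed; no slicing or reshaping phase remains.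
import Mathlib
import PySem

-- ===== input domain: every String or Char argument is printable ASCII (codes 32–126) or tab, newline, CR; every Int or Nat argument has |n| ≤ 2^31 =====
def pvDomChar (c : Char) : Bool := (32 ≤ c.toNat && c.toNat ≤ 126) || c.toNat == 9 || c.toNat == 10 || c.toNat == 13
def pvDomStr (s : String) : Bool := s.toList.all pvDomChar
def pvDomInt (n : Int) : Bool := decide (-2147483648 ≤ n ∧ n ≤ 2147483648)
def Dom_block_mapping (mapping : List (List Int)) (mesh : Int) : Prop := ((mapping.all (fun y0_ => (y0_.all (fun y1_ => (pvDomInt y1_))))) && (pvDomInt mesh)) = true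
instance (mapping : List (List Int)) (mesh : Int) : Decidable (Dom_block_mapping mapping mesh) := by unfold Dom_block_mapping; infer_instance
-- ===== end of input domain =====

-- B replaces A's materialize/slice/reshape pipeline by one streaming pass that feeds padded cells
-- into row/grid/tile accumulators, flushing a tile and its grid every mesh*mesh cells; proved equal
-- to A on Pre_ (mesh ≠ 0, every row long enough for row[2]), exactly where the Python A returns.

-- math.ceil(a / b) for ints: exact for b ≠ 0 (Python raises ZeroDivisionError at b = 0, excluded by Pre_)
def pyCeilDiv (a b : Int) : Int := -(PySem.Int.floordiv (-a) b)

-- ===== PORT A =====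
def convert_to_mesh_layout (input_lists : List (List Int)) (mesh_size : Int) : PySem.Dict Int (List (List Int)) :=
  let total_elements := mesh_size * mesh_size
  (PySem.List.enumerate input_lists 0).foldl (fun result p =>
    let padded_list :=
      if (p.2.length : Int) < total_elements then
        p.2 ++ List.replicate (total_elements - (p.2.length : Int)).toNat 0
      else p.2
    let mesh_layout := (PySem.List.pyRange 0 mesh_size 1).foldl (fun ml i =>
      ml ++ [PySem.List.slice padded_list (some (i * mesh_size)) (some (i * mesh_size + mesh_size))]) []
    result.insert p.1 mesh_layout) PySem.Dict.empty

def block_mapping (mapping : List (List Int)) (mesh : Int) : (List (Int × List (List Int))) × List (List Int) :=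
  let chip := (PySem.List.pyRange 0 (mapping.length : Int) 1).foldl (fun chip i =>
    (PySem.List.pyRange 0 (PySem.List.pyGetD (PySem.List.pyGetD mapping i []) 2 0) 1).foldl
      (fun chip _ => chip ++ [i + 1]) chip) []
  let num_tile := mesh * mesh
  let num_chip := pyCeilDiv (chip.length : Int) num_tile
  let all_chip := (PySem.List.pyRange 0 num_chip 1).foldl (fun all_chip j =>
    if j == num_chip - 1 then
      all_chip ++ [PySem.List.slice chip (some (j * num_tile)) none]
    else
      all_chip ++ [PySem.List.slice chip (some (j * num_tile)) (some ((j + 1) * num_tile))]) []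
  let input_layout := convert_to_mesh_layout all_chip mesh
  (input_layout.items, all_chip)

-- ===== PORT B =====
-- the streaming state: layout dict, finished tiles, current tile / grid / row, next key j, cell count c
structure BMState where
  d : PySem.Dict Int (List (List Int))
  all : List (List Int)
  tile : List Int
  grid : List (List Int)
  row : List Int
  j : Int
  c : Int

-- one iteration of B's loop body (cell = (v, real))
def bmStep (mesh num_tile : Int) (s : BMState) (cell : Int × Bool) : BMState :=
  let tile := if cell.2 then s.tile ++ [cell.1] else s.tile
  let row := s.row ++ [cell.1]
  let gr : List (List Int) × List Int :=
    if (row.length : Int) == mesh then (s.grid ++ [row], []) else (s.grid, row)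
  let c := s.c + 1
  if c == num_tile then
    ⟨s.d.insert s.j gr.1, s.all ++ [tile], [], [], [], s.j + 1, 0⟩
  else
    ⟨s.d, s.all, tile, gr.1, gr.2, s.j, c⟩

def block_mapping_alt (mapping : List (List Int)) (mesh : Int) : (List (Int × List (List Int))) × List (List Int) :=
  let num_tile := mesh * mesh
  let cells0 := (PySem.List.enumerate mapping 0).foldl (fun acc p =>
    acc ++ (PySem.List.pyRange 0 (PySem.List.pyGetD p.2 2 0) 1).map (fun _ => (p.1 + 1, true))) []
  let cells := cells0 ++ List.replicate (PySem.Int.mod (-(cells0.length : Int)) num_tile).toNat (0, false)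
  let st := cells.foldl (bmStep mesh num_tile) ⟨PySem.Dict.empty, [], [], [], [], 0, 0⟩
  (st.d.items, st.all)

-- ===== PRECONDITION & SPEC =====
-- Pre_ = exactly where the Python A returns: mesh ≠ 0 (else math.ceil divides by zero) and every
-- row has at least 3 elements (else mapping[i][2] raises IndexError).
def Pre_block_mapping (mapping : List (List Int)) (mesh : Int) : Prop :=
  mesh ≠ 0 ∧ ∀ row ∈ mapping, 3 ≤ row.length
instance (mapping : List (List Int)) (mesh : Int) : Decidable (Pre_block_mapping mapping mesh) := by
  unfold Pre_block_mapping; infer_instance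
def pvWitness_block_mapping : List (List Int) × Int := ([[0, 0, 2], [1, 1, 3]], 2)
def Spec_block_mapping (mapping : List (List Int)) (mesh : Int) (out : (List (Int × List (List Int))) × List (List Int)) : Prop := out = block_mapping_alt mapping mesh
instance (mapping : List (List Int)) (mesh : Int) (out : (List (Int × List (List Int))) × List (List Int)) : Decidable (Spec_block_mapping mapping mesh out) := by unfold Spec_block_mapping; infer_instance

-- ===== CLAIM (what is proved, stated in full; the proofs are below) =====
def Claim_equal_block_mapping : Prop := ∀ (mapping : List (List Int)) (mesh : Int), Dom_block_mapping mapping mesh → Pre_block_mapping mapping mesh → Spec_block_mapping mapping mesh (block_mapping mapping mesh)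

-- ===== LEMMAS AND PROOFS =====

-- ---- A-side characterisation (tiles as slices, grids as mapped slices) ----

theorem foldl_push_const (l : List Int) (acc : List Int) (v : Int) :
    l.foldl (fun c _ => c ++ [v]) acc = acc ++ List.replicate l.length v := by
  induction l generalizing acc with
  | nil => simp
  | cons x xs ih => simp [List.foldl_cons, ih, List.replicate_succ]

-- A's chip list equals the enumerate/replicate form
theorem chipA_eq (mapping : List (List Int)) :
    (PySem.List.pyRange 0 (mapping.length : Int) 1).foldl (fun chip i =>
      (PySem.List.pyRange 0 (PySem.List.pyGetD (PySem.List.pyGetD mapping i []) 2 0) 1).foldl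
        (fun chip _ => chip ++ [i + 1]) chip) [] =
    (PySem.List.enumerate mapping 0).foldl (fun chip p =>
      chip ++ List.replicate (PySem.List.pyGetD p.2 2 0).toNat (p.1 + 1)) [] := by
  rw [PySem.List.enumerate_eq_map_pyRange (d := []), List.foldl_map]
  have h : (fun (chip : List Int) (i : Int) =>
      (PySem.List.pyRange 0 (PySem.List.pyGetD (PySem.List.pyGetD mapping i []) 2 0) 1).foldl
        (fun chip _ => chip ++ [i + 1]) chip) =
      (fun (chip : List Int) (i : Int) =>
        chip ++ List.replicate (PySem.List.pyGetD (PySem.List.pyGetD mapping i []) 2 0).toNat (i + 1)) := by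
    funext chip i
    rw [foldl_push_const, PySem.List.length_pyRange_one]
    norm_num
  simp only [PySem.List.len_eq] at h ⊢
  rw [h]

theorem enum_map_pyRange {α : Type} (f : Int → α) (n : Nat) (a : Int) :
    PySem.List.enumerate ((PySem.List.pyRange a (a + (n : Int)) 1).map f) a =
      (PySem.List.pyRange a (a + (n : Int)) 1).map (fun j => (j, f j)) := by
  induction n generalizing a with
  | zero => simp [PySem.List.pyRange_one_eq_nil (le_refl a), PySem.List.enumerate_nil]
  | succ m ih =>
      rw [PySem.List.pyRange_one_cons (by omega : a < a + ((m + 1 : Nat) : Int))]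
      have : a + ((m + 1 : Nat) : Int) = (a + 1) + (m : Int) := by push_cast; ring
      rw [this]
      simp only [List.map_cons, PySem.List.enumerate_cons, ih (a + 1)]

-- proof-side abbreviations for the tile and grid A builds
def tileF (chip : List Int) (nt nc j : Int) : List Int :=
  if j == nc - 1 then PySem.List.slice chip (some (j * nt)) none
  else PySem.List.slice chip (some (j * nt)) (some ((j + 1) * nt))

def gridF (mesh nt : Int) (tile : List Int) : List (List Int) :=
  (PySem.List.pyRange 0 mesh 1).map (fun r =>
    PySem.List.slice (tile ++ List.replicate (nt - (tile.length : Int)).toNat 0)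
      (some (r * mesh)) (some ((r + 1) * mesh)))

theorem padded_eq (layer : List Int) (nt : Int) :
    (if (layer.length : Int) < nt then layer ++ List.replicate (nt - (layer.length : Int)).toNat 0
     else layer) = layer ++ List.replicate (nt - (layer.length : Int)).toNat 0 := by
  by_cases h : (layer.length : Int) < nt
  · simp [h]
  · have : (nt - (layer.length : Int)).toNat = 0 := by omega
    simp [h, this]

-- A's per-layer mesh_layout equals gridF
theorem grid_eq (layer : List Int) (mesh nt : Int) :
    (PySem.List.pyRange 0 mesh 1).foldl (fun ml i =>
      ml ++ [PySem.List.slice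
        (if (layer.length : Int) < nt then layer ++ List.replicate (nt - (layer.length : Int)).toNat 0
         else layer) (some (i * mesh)) (some (i * mesh + mesh))]) [] = gridF mesh nt layer := by
  rw [padded_eq, PySem.List.foldl_append_singleton_eq_map, gridF]
  simp only [List.nil_append]
  apply List.map_congr_left
  intro i _
  have h : i * mesh + mesh = (i + 1) * mesh := by ring
  rw [h]

theorem allA_eq_map (chip : List Int) (nt nc : Int) :
    (PySem.List.pyRange 0 nc 1).foldl (fun all_chip j =>
      if j == nc - 1 then all_chip ++ [PySem.List.slice chip (some (j * nt)) none]
      else all_chip ++ [PySem.List.slice chip (some (j * nt)) (some ((j + 1) * nt))]) [] =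
    (PySem.List.pyRange 0 nc 1).map (tileF chip nt nc) := by
  have h : (fun (all_chip : List (List Int)) (j : Int) =>
      if j == nc - 1 then all_chip ++ [PySem.List.slice chip (some (j * nt)) none]
      else all_chip ++ [PySem.List.slice chip (some (j * nt)) (some ((j + 1) * nt))]) =
      fun all_chip j => all_chip ++ [tileF chip nt nc j] := by
    funext all_chip j
    by_cases hj : (j == nc - 1) = true <;> simp [tileF, hj]
  rw [h, PySem.List.foldl_append_singleton_eq_map, List.nil_append]

theorem layoutA_items (chip : List Int) (mesh nt nc : Int) (h : 0 ≤ nc) :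
    (convert_to_mesh_layout ((PySem.List.pyRange 0 nc 1).map (tileF chip nt nc)) mesh).items =
      (PySem.List.pyRange 0 nc 1).map
        (fun j => (j, gridF mesh (mesh * mesh) (tileF chip nt nc j))) := by
  unfold convert_to_mesh_layout
  obtain ⟨n, rfl⟩ : ∃ n : Nat, nc = (n : Int) := ⟨nc.toNat, (Int.toNat_of_nonneg h).symm⟩
  have h0 : (0 : Int) + (n : Int) = (n : Int) := by ring
  rw [← h0, enum_map_pyRange, h0, List.foldl_map]
  have hfresh := PySem.Dict.items_foldl_insert_fresh
      (d := (PySem.Dict.empty : PySem.Dict Int (List (List Int))))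
      (l := PySem.List.pyRange 0 (n : Int) 1) (k := fun j : Int => j)
      (v := fun j : Int => (PySem.List.pyRange 0 mesh 1).foldl (fun ml i =>
          ml ++ [PySem.List.slice
            (if ((tileF chip nt (n : Int) j).length : Int) < mesh * mesh then
              tileF chip nt (n : Int) j ++
                List.replicate (mesh * mesh - ((tileF chip nt (n : Int) j).length : Int)).toNat 0
             else tileF chip nt (n : Int) j) (some (i * mesh)) (some (i * mesh + mesh))]) [])
      (by intro a _; exact PySem.Dict.contains_empty _)
      (by rw [List.map_id']; exact PySem.List.nodup_pyRange_one 0 (n : Int))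
  simp only [PySem.Dict.empty, List.nil_append] at hfresh
  refine hfresh.trans ?_
  apply List.map_congr_left
  intro j _
  rw [grid_eq]

-- ---- B-side: the streaming fold, block by block ----

-- the real values fed to the current tile
def realsOf (cs : List (Int × Bool)) : List Int := (cs.filter (·.2)).map (·.1)

-- the grid/row accumulator of the streaming loop, isolated
def cutAcc (mesh : Int) : List (List Int) → List Int → List Int → List (List Int) × List Int
  | grid, row, [] => (grid, row)
  | grid, row, v :: vs =>
      if ((row ++ [v]).length : Int) == mesh then cutAcc mesh (grid ++ [row ++ [v]]) [] vs
      else cutAcc mesh grid (row ++ [v]) vs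

def gridFull (mesh : Int) (vs : List Int) : List (List Int) := (cutAcc mesh [] [] vs).1

theorem realsOf_cons (x : Int × Bool) (xs : List (Int × Bool)) :
    realsOf (x :: xs) = (if x.2 then [x.1] else []) ++ realsOf xs := by
  by_cases h : x.2 = true <;> simp [realsOf, List.filter_cons, h]

theorem realsOf_append (xs ys : List (Int × Bool)) :
    realsOf (xs ++ ys) = realsOf xs ++ realsOf ys := by
  simp [realsOf]

theorem realsOf_true (l : List Int) :
    realsOf (l.map (fun v => (v, true))) = l := by
  induction l with
  | nil => rfl
  | cons x xs ih => simp only [List.map_cons, realsOf_cons, ih]; rfl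

theorem realsOf_pad (n : Nat) : realsOf (List.replicate n ((0 : Int), false)) = [] := by
  induction n with
  | zero => rfl
  | succ m ih => simp only [List.replicate_succ, realsOf_cons, ih]; rfl

theorem cutAcc_append (mesh : Int) (xs ys : List Int) :
    ∀ grid row, cutAcc mesh grid row (xs ++ ys) =
      cutAcc mesh (cutAcc mesh grid row xs).1 (cutAcc mesh grid row xs).2 ys := by
  induction xs with
  | nil => intro grid row; simp [cutAcc]
  | cons v vs ih =>
      intro grid row
      simp only [List.cons_append, cutAcc]
      split
      · exact ih _ _
      · exact ih _ _

-- feeding cells without ever flushing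
theorem feed_no_flush (mesh nt : Int) (cs : List (Int × Bool)) :
    ∀ (d : PySem.Dict Int (List (List Int))) (all : List (List Int)) (tile : List Int)
      (grid : List (List Int)) (row : List Int) (j c : Int),
      c + (cs.length : Int) < nt →
      cs.foldl (bmStep mesh nt) ⟨d, all, tile, grid, row, j, c⟩ =
        ⟨d, all, tile ++ realsOf cs, (cutAcc mesh grid row (cs.map (·.1))).1,
          (cutAcc mesh grid row (cs.map (·.1))).2, j, c + (cs.length : Int)⟩ := by
  induction cs with
  | nil => intro d all tile grid row j c _; simp [realsOf, cutAcc]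
  | cons x xs ih =>
      intro d all tile grid row j c hlt
      simp only [List.length_cons] at hlt
      push_cast at hlt
      have hne : ((c + 1) == nt) = false := by
        simp only [beq_eq_false_iff_ne, ne_eq]
        omega
      have hb : bmStep mesh nt ⟨d, all, tile, grid, row, j, c⟩ x =
          ⟨d, all, if x.2 then tile ++ [x.1] else tile,
            if ((row ++ [x.1]).length : Int) == mesh then grid ++ [row ++ [x.1]] else grid,
            if ((row ++ [x.1]).length : Int) == mesh then [] else row ++ [x.1], j, c + 1⟩ := by
        simp only [bmStep, hne, Bool.false_eq_true, if_false]
        split <;> split <;> rfl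
      rw [List.foldl_cons, hb, ih _ _ _ _ _ _ _ (by omega)]
      simp only [List.map_cons, cutAcc, realsOf_cons, BMState.mk.injEq, List.length_cons]
      and_intros <;>
        first
          | trivial
          | (split_ifs <;> rfl)
          | (split_ifs <;> simp)
          | (push_cast; ring)

-- one full block flushes: tile and grid are stored, state returns to clean with key j+1
theorem block_flush (mesh nt : Int) (hnt : 0 < nt) (cs : List (Int × Bool))
    (hlen : (cs.length : Int) = nt)
    (d : PySem.Dict Int (List (List Int))) (all : List (List Int)) (j : Int) :
    cs.foldl (bmStep mesh nt) ⟨d, all, [], [], [], j, 0⟩ =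
      ⟨d.insert j (gridFull mesh (cs.map (·.1))), all ++ [realsOf cs], [], [], [], j + 1, 0⟩ := by
  rcases List.eq_nil_or_concat cs with rfl | ⟨ys, y, rfl⟩
  · exfalso; simp only [List.length_nil, Nat.cast_zero] at hlen; omega
  · rw [List.concat_eq_append, List.foldl_append]
    simp only [List.concat_eq_append, List.length_append, List.length_cons,
      List.length_nil] at hlen
    rw [feed_no_flush mesh nt ys d all [] [] [] j 0 (by push_cast at hlen ⊢; omega)]
    have hc : ((0 : Int) + (ys.length : Int) + 1 == nt) = true := by
      simp only [beq_iff_eq]; push_cast at hlen; omega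
    simp only [List.foldl_cons, List.foldl_nil, bmStep, hc, if_true]
    simp only [List.map_append, List.map_cons, List.map_nil, cutAcc_append, gridFull,
      realsOf_append, BMState.mk.injEq]
    and_intros <;>
      first
        | trivial
        | (congr 1
           generalize cutAcc mesh [] [] (ys.map (·.1)) = p
           simp only [cutAcc]
           split <;> rfl)
        | (split_ifs <;> simp_all [realsOf])

-- the blocks of w consecutive elements
def chunksW {α : Type} (w : Nat) : Nat → List α → List (List α)
  | 0, _ => []
  | m + 1, vs => vs.take w :: chunksW w m (vs.drop w)

-- inserting the grids of a block list under consecutive keys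
def insertAll (mesh : Int) : PySem.Dict Int (List (List Int)) → Int → List (List (Int × Bool)) →
    PySem.Dict Int (List (List Int))
  | d, _, [] => d
  | d, j, b :: bs => insertAll mesh (d.insert j (gridFull mesh (b.map (·.1)))) (j + 1) bs

-- m full blocks from a clean state
theorem feed_blocks (mesh nt : Int) (hnt : 0 < nt) :
    ∀ (m : Nat) (S : List (Int × Bool)) (d : PySem.Dict Int (List (List Int)))
      (all : List (List Int)) (j : Int), S.length = m * nt.toNat →
      S.foldl (bmStep mesh nt) ⟨d, all, [], [], [], j, 0⟩ =
        ⟨insertAll mesh d j (chunksW nt.toNat m S),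
          all ++ (chunksW nt.toNat m S).map realsOf, [], [], [], j + (m : Int), 0⟩ := by
  intro m
  induction m with
  | zero =>
      intro S d all j hS
      simp only [Nat.zero_mul] at hS
      have hS' : S = [] := List.eq_nil_of_length_eq_zero hS
      subst hS'
      simp [chunksW, insertAll]
  | succ m ih =>
      intro S d all j hS
      have hB : nt.toNat ≤ S.length := by
        rw [hS]; calc nt.toNat = 1 * nt.toNat := (Nat.one_mul _).symm
          _ ≤ (m + 1) * nt.toNat := Nat.mul_le_mul_right _ (by omega)
      have hBlen : ((S.take nt.toNat).length : Int) = nt := by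
        rw [List.length_take]; omega
      have hrest : (S.drop nt.toNat).length = m * nt.toNat := by
        rw [List.length_drop, hS]
        have : (m + 1) * nt.toNat = m * nt.toNat + nt.toNat := by ring
        omega
      conv_lhs => rw [← List.take_append_drop nt.toNat S]
      rw [List.foldl_append, block_flush mesh nt hnt _ hBlen,
        ih (S.drop nt.toNat) _ _ (j + 1) hrest]
      simp only [chunksW, insertAll, List.map_cons, BMState.mk.injEq]
      and_intros <;> first | trivial | (push_cast; ring) | simp

theorem insertAll_eq_foldl (mesh : Int) (bs : List (List (Int × Bool))) :
    ∀ (d : PySem.Dict Int (List (List Int))) (j : Int),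
      insertAll mesh d j bs = (PySem.List.enumerate bs j).foldl
        (fun dd p => dd.insert p.1 (gridFull mesh (p.2.map (·.1)))) d := by
  induction bs with
  | nil => intro d j; simp [insertAll, PySem.List.enumerate_nil]
  | cons b bs ih => intro d j; simp [insertAll, PySem.List.enumerate_cons, ih]

theorem insertAll_items (mesh : Int) (bs : List (List (Int × Bool))) (j : Int) :
    (insertAll mesh PySem.Dict.empty j bs).items =
      (PySem.List.enumerate bs j).map (fun p => (p.1, gridFull mesh (p.2.map (·.1)))) := by
  rw [insertAll_eq_foldl]
  have hfresh := PySem.Dict.items_foldl_insert_fresh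
      (d := (PySem.Dict.empty : PySem.Dict Int (List (List Int))))
      (l := PySem.List.enumerate bs j) (k := fun p : Int × List (Int × Bool) => p.1)
      (v := fun p : Int × List (Int × Bool) => gridFull mesh (p.2.map (·.1)))
      (by intro a _; exact PySem.Dict.contains_empty _)
      (by rw [PySem.List.map_fst_enumerate]; exact PySem.List.nodup_pyRange_one _ _)
  simpa using hfresh

theorem enum_range_map {α : Type} :
    ∀ (m : Nat) (g : Nat → α) (s : Int), PySem.List.enumerate ((List.range m).map g) s =
      (List.range m).map (fun (k : Nat) => (s + (k : Int), g k)) := by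
  intro m
  induction m with
  | zero => intro g s; simp [PySem.List.enumerate_nil]
  | succ n ih =>
      intro g s
      rw [List.range_succ_eq_map]
      simp only [List.map_cons, List.map_map, PySem.List.enumerate_cons]
      rw [ih (g ∘ Nat.succ) (s + 1)]
      congr 1
      · simp
      · apply List.map_congr_left
        intro k _
        simp only [Function.comp, Prod.mk.injEq]
        exact ⟨by push_cast; ring, by trivial⟩

theorem chunksW_eq_range {α : Type} (w : Nat) :
    ∀ (m : Nat) (vs : List α),
      chunksW w m vs = (List.range m).map (fun k => (vs.drop (k * w)).take w) := by
  intro m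
  induction m with
  | zero => intro vs; simp [chunksW]
  | succ m ih =>
      intro vs
      rw [List.range_succ_eq_map, List.map_cons, List.map_map]
      simp only [chunksW]
      congr 1
      · simp
      · rw [ih (vs.drop w)]
        apply List.map_congr_left
        intro k _
        simp only [Function.comp]
        rw [List.drop_drop]
        congr 2
        rw [Nat.succ_eq_add_one]
        ring

-- ---- grids: the streaming cut equals A's mapped slices ----

theorem cutAcc_neg (mesh : Int) (hm : mesh < 0) (vs : List Int) :
    ∀ grid row, cutAcc mesh grid row vs = (grid, row ++ vs) := by
  induction vs with
  | nil => intro grid row; simp [cutAcc]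
  | cons v vs ih =>
      intro grid row
      have h : ¬((row.length : Int) + 1 = mesh) := by omega
      simp [cutAcc, h, ih]

theorem cut_row (mesh : Int) (hm : 0 < mesh) (cs : List Int) :
    ∀ (row : List Int) (grid : List (List Int)) (rest : List Int),
      row.length + cs.length = mesh.toNat → 0 < cs.length →
      cutAcc mesh grid row (cs ++ rest) = cutAcc mesh (grid ++ [row ++ cs]) [] rest := by
  induction cs with
  | nil => intro _ _ _ _ h; simp at h
  | cons v vs ih =>
      intro row grid rest hlen _
      rcases eq_or_ne vs [] with rfl | hvs
      · have h : ((row.length : Int) + 1 = mesh) := by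
          simp only [List.length_cons, List.length_nil] at hlen; push_cast; omega
        simp [cutAcc, h]
      · have hv : 0 < vs.length := List.length_pos_of_ne_nil hvs
        have h : ¬((row.length : Int) + 1 = mesh) := by
          simp only [List.length_cons] at hlen; push_cast; omega
        have hlen' : (row ++ [v]).length + vs.length = mesh.toNat := by
          simp only [List.length_append, List.length_cons, List.length_nil]
          simp only [List.length_cons] at hlen; omega
        simp only [List.cons_append, cutAcc]
        rw [if_neg (by simpa using h)]
        rw [ih (row ++ [v]) grid rest hlen' hv]
        have hrw : row ++ [v] ++ vs = row ++ v :: vs := by simp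
        rw [hrw]

theorem cutAcc_chunks (mesh : Int) (hm : 0 < mesh) :
    ∀ (m : Nat) (vs : List Int) (grid : List (List Int)), vs.length = m * mesh.toNat →
      cutAcc mesh grid [] vs = (grid ++ chunksW mesh.toNat m vs, []) := by
  intro m
  induction m with
  | zero => intro vs grid h; simp only [Nat.zero_mul] at h
            have h' : vs = [] := List.eq_nil_of_length_eq_zero h
            subst h'; simp [cutAcc, chunksW]
  | succ m ih =>
      intro vs grid hlen
      have hw : 0 < mesh.toNat := by omega
      have hB : mesh.toNat ≤ vs.length := by
        rw [hlen]; calc mesh.toNat = 1 * mesh.toNat := (Nat.one_mul _).symm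
          _ ≤ (m + 1) * mesh.toNat := Nat.mul_le_mul_right _ (by omega)
      have htk : (vs.take mesh.toNat).length = mesh.toNat := by
        rw [List.length_take]; omega
      have hdl : (vs.drop mesh.toNat).length = m * mesh.toNat := by
        rw [List.length_drop, hlen]
        have h' : (m + 1) * mesh.toNat = m * mesh.toNat + mesh.toNat := by ring
        omega
      conv_lhs => rw [← List.take_append_drop mesh.toNat vs]
      rw [cut_row mesh hm _ [] grid _ (by simpa using htk) (by omega)]
      rw [ih (vs.drop mesh.toNat) _ hdl]
      simp [chunksW, List.append_assoc]

-- for any vs of length (mesh*mesh).toNat: streaming cut = A's mapped slices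
theorem gridFull_eq_slices (mesh : Int) (hm : mesh ≠ 0) (vs : List Int)
    (hlen : vs.length = ((mesh * mesh).toNat)) :
    gridFull mesh vs =
      (PySem.List.pyRange 0 mesh 1).map (fun r =>
        PySem.List.slice vs (some (r * mesh)) (some ((r + 1) * mesh))) := by
  rcases lt_or_gt_of_ne hm with hneg | hpos
  · rw [PySem.List.pyRange_one_eq_nil (by omega : mesh ≤ 0)]
    simp [gridFull, cutAcc_neg mesh hneg]
  · have hvs : vs.length = mesh.toNat * mesh.toNat := by
      rw [hlen, Int.toNat_mul (by omega) (by omega)]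
    rw [gridFull, cutAcc_chunks mesh hpos mesh.toNat vs [] hvs]
    simp only [List.nil_append]
    rw [chunksW_eq_range]
    rw [PySem.List.pyRange_one]
    simp only [Int.sub_zero, List.map_map]
    apply List.map_congr_left
    intro k _
    simp only [Function.comp, zero_add]
    have h1 : (k : Int) * mesh = ((k * mesh.toNat : Nat) : Int) := by
      push_cast [Int.toNat_of_nonneg hpos.le]; ring
    have h2 : ((k : Int) + 1) * mesh = (((k + 1) * mesh.toNat : Nat) : Int) := by
      push_cast [Int.toNat_of_nonneg hpos.le]; ring
    have h3 : (k + 1) * mesh.toNat - k * mesh.toNat = mesh.toNat := by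
      have hsm : (k + 1) * mesh.toNat = k * mesh.toNat + mesh.toNat := by ring
      omega
    rw [h1, h2, PySem.List.slice_natCast, h3]

-- ---- assembling B's cell list ----

theorem foldl_rep_pair (l : List (Int × List Int)) :
    ∀ acc : List Int,
      l.foldl (fun acc p =>
        acc ++ (PySem.List.pyRange 0 (PySem.List.pyGetD p.2 2 0) 1).map (fun _ => (p.1 + 1, true))) (acc.map (fun v => (v, true))) =
      (l.foldl (fun acc p =>
        acc ++ List.replicate (PySem.List.pyGetD p.2 2 0).toNat (p.1 + 1)) acc).map (fun v => (v, true)) := by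
  induction l with
  | nil => intro acc; simp
  | cons p ps ih =>
      intro acc
      simp only [List.foldl_cons]
      have h : acc.map (fun v => (v, true)) ++
          (PySem.List.pyRange 0 (PySem.List.pyGetD p.2 2 0) 1).map (fun _ => ((p.1 + 1 : Int), true)) =
          (acc ++ List.replicate (PySem.List.pyGetD p.2 2 0).toNat (p.1 + 1)).map (fun v => (v, true)) := by
        rw [List.map_append, List.map_replicate]
        congr 1
        have hl : ((PySem.List.pyRange 0 (PySem.List.pyGetD p.2 2 0) 1).map
            (fun _ => ((p.1 + 1 : Int), true))).length = (PySem.List.pyGetD p.2 2 0).toNat := by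
          rw [List.length_map, PySem.List.length_pyRange_one]; norm_num
        rw [List.eq_replicate_iff.mpr ⟨hl, by intro b hb; simp at hb; exact hb.2⟩]
      rw [h, ih]

-- ---- per-block correspondence between B's stream and A's tiles/grids ----

theorem map_fst_pair_true (l : List Int) :
    l.map ((fun x : Int × Bool => x.1) ∘ (fun v : Int => (v, true))) = l := by
  induction l with
  | nil => rfl
  | cons a t ih => simp only [List.map_cons, Function.comp_apply, ih]

theorem block_spec (chip : List Int) (mesh : Int) (hmesh : mesh ≠ 0) (nc ppad : Int)
    (hp0 : 0 ≤ ppad) (hplt : ppad < mesh * mesh)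
    (hsum : nc * (mesh * mesh) = (chip.length : Int) + ppad)
    (k : Nat) (hk : k < nc.toNat) :
    realsOf (((chip.map (fun v => (v, true)) ++
        List.replicate ppad.toNat ((0 : Int), false)).drop (k * (mesh * mesh).toNat)).take
          (mesh * mesh).toNat) = tileF chip (mesh * mesh) nc (k : Int) ∧
    gridFull mesh ((((chip.map (fun v => (v, true)) ++
        List.replicate ppad.toNat ((0 : Int), false)).drop (k * (mesh * mesh).toNat)).take
          (mesh * mesh).toNat).map (·.1)) =
      gridF mesh (mesh * mesh) (tileF chip (mesh * mesh) nc (k : Int)) := by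
  have hnt : 0 < mesh * mesh := mul_self_pos.mpr hmesh
  have hB : (((mesh * mesh).toNat : Int)) = mesh * mesh := Int.toNat_of_nonneg hnt.le
  have hnc0 : 0 ≤ nc := by
    by_contra h
    push_neg at h
    have hneg : nc * (mesh * mesh) < 0 := mul_neg_of_neg_of_pos h hnt
    omega
  have hm' : ((nc.toNat : Int)) = nc := Int.toNat_of_nonneg hnc0
  have hP : ((nc.toNat * (mesh * mesh).toNat : Nat) : Int) = (chip.length : Int) + ppad := by
    push_cast
    rw [hB, hm']
    exact hsum
  have hLP : chip.length + ppad.toNat = nc.toNat * (mesh * mesh).toNat := by omega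
  have hpB : ppad.toNat < (mesh * mesh).toNat := by omega
  have hmulk : (k + 1) * (mesh * mesh).toNat = k * (mesh * mesh).toNat + (mesh * mesh).toNat := by
    ring
  have hmulm : nc.toNat * (mesh * mesh).toNat =
      (nc.toNat - 1) * (mesh * mesh).toNat + (mesh * mesh).toNat := by
    have : nc.toNat - 1 + 1 = nc.toNat := by omega
    calc nc.toNat * (mesh * mesh).toNat = (nc.toNat - 1 + 1) * (mesh * mesh).toNat := by rw [this]
      _ = (nc.toNat - 1) * (mesh * mesh).toNat + (mesh * mesh).toNat := by ring
  have hcast1 : (k : Int) * (mesh * mesh) = ((k * (mesh * mesh).toNat : Nat) : Int) := by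
    push_cast; rw [hB]
  by_cases hlast : k + 1 = nc.toNat
  · -- last block: real values then all the padding
    have hkml : k * (mesh * mesh).toNat = (nc.toNat - 1) * (mesh * mesh).toNat := by
      congr 1; omega
    have hkL : k * (mesh * mesh).toNat ≤ chip.length := by omega
    have hdropped : ((chip.map (fun v => (v, true)) ++
        List.replicate ppad.toNat ((0 : Int), false)).drop (k * (mesh * mesh).toNat)) =
        (chip.drop (k * (mesh * mesh).toNat)).map (fun v => (v, true)) ++
          List.replicate ppad.toNat ((0 : Int), false) := by
      rw [List.drop_append]
      congr 1
      · rw [List.map_drop]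
      · rw [List.length_map]
        have h0 : k * (mesh * mesh).toNat - chip.length = 0 := by omega
        rw [h0, List.drop_zero]
    have hlen' : ((chip.drop (k * (mesh * mesh).toNat)).map (fun v => (v, true)) ++
        List.replicate ppad.toNat ((0 : Int), false)).length = (mesh * mesh).toNat := by
      simp only [List.length_append, List.length_map, List.length_drop, List.length_replicate]
      omega
    have hblk : (((chip.map (fun v => (v, true)) ++
        List.replicate ppad.toNat ((0 : Int), false)).drop (k * (mesh * mesh).toNat)).take
          (mesh * mesh).toNat) =
        (chip.drop (k * (mesh * mesh).toNat)).map (fun v => (v, true)) ++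
          List.replicate ppad.toNat ((0 : Int), false) := by
      rw [hdropped, List.take_of_length_le (le_of_eq hlen')]
    have htile : tileF chip (mesh * mesh) nc (k : Int) = chip.drop (k * (mesh * mesh).toNat) := by
      rw [tileF, if_pos (by simp only [beq_iff_eq]; omega)]
      rw [hcast1, PySem.List.slice_from_natCast]
    constructor
    · rw [hblk, realsOf_append, realsOf_true, realsOf_pad, List.append_nil, htile]
    · have hvals : ((((chip.map (fun v => (v, true)) ++
          List.replicate ppad.toNat ((0 : Int), false)).drop (k * (mesh * mesh).toNat)).take
            (mesh * mesh).toNat).map (·.1)) =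
          chip.drop (k * (mesh * mesh).toNat) ++ List.replicate ppad.toNat (0 : Int) := by
        rw [hblk, List.map_append, List.map_map, List.map_replicate, map_fst_pair_true]
      have hpadarg : tileF chip (mesh * mesh) nc (k : Int) ++
          List.replicate ((mesh * mesh) -
            ((tileF chip (mesh * mesh) nc (k : Int)).length : Int)).toNat 0 =
          chip.drop (k * (mesh * mesh).toNat) ++ List.replicate ppad.toNat (0 : Int) := by
        rw [htile]
        congr 2
        rw [List.length_drop]
        omega
      rw [hvals, gridFull_eq_slices mesh hmesh _ (by
        simp only [List.length_append, List.length_drop, List.length_replicate]; omega)]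
      rw [gridF, hpadarg]
  · -- middle block: entirely real values
    have hkk : k * (mesh * mesh).toNat + (mesh * mesh).toNat ≤ chip.length := by
      have hk1 : k + 1 ≤ nc.toNat - 1 := by omega
      have := Nat.mul_le_mul_right (mesh * mesh).toNat hk1
      omega
    have hdropped : ((chip.map (fun v => (v, true)) ++
        List.replicate ppad.toNat ((0 : Int), false)).drop (k * (mesh * mesh).toNat)) =
        (chip.drop (k * (mesh * mesh).toNat)).map (fun v => (v, true)) ++
          List.replicate ppad.toNat ((0 : Int), false) := by
      rw [List.drop_append]
      congr 1
      · rw [List.map_drop]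
      · rw [List.length_map]
        have h0 : k * (mesh * mesh).toNat - chip.length = 0 := by omega
        simp [h0]
    have hxlen : ((chip.drop (k * (mesh * mesh).toNat)).map
        (fun v => (v, true)) : List (Int × Bool)).length =
        chip.length - k * (mesh * mesh).toNat := by
      rw [List.length_map, List.length_drop]
    have hblk : (((chip.map (fun v => (v, true)) ++
        List.replicate ppad.toNat ((0 : Int), false)).drop (k * (mesh * mesh).toNat)).take
          (mesh * mesh).toNat) =
        ((chip.drop (k * (mesh * mesh).toNat)).take (mesh * mesh).toNat).map
          (fun v => (v, true)) := by
      rw [hdropped, List.take_append]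
      rw [List.map_take]
      have h0 : (mesh * mesh).toNat -
          ((chip.drop (k * (mesh * mesh).toNat)).map (fun v => (v, true))).length = 0 := by
        rw [hxlen]; omega
      simp [h0]
      omega
    have htlen : ((chip.drop (k * (mesh * mesh).toNat)).take (mesh * mesh).toNat).length =
        (mesh * mesh).toNat := by
      rw [List.length_take, List.length_drop]; omega
    have htile : tileF chip (mesh * mesh) nc (k : Int) =
        (chip.drop (k * (mesh * mesh).toNat)).take (mesh * mesh).toNat := by
      rw [tileF, if_neg (by simp only [beq_iff_eq]; omega)]
      have hcast2 : ((k : Int) + 1) * (mesh * mesh) =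
          (((k + 1) * (mesh * mesh).toNat : Nat) : Int) := by
        push_cast; rw [hB]; try ring
      rw [hcast1, hcast2, PySem.List.slice_natCast]
      congr 1
      omega
    constructor
    · rw [hblk, realsOf_true, htile]
    · have hvals : ((((chip.map (fun v => (v, true)) ++
          List.replicate ppad.toNat ((0 : Int), false)).drop (k * (mesh * mesh).toNat)).take
            (mesh * mesh).toNat).map (·.1)) =
          (chip.drop (k * (mesh * mesh).toNat)).take (mesh * mesh).toNat := by
        rw [hblk, List.map_map, map_fst_pair_true]
      have hpadarg : tileF chip (mesh * mesh) nc (k : Int) ++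
          List.replicate ((mesh * mesh) -
            ((tileF chip (mesh * mesh) nc (k : Int)).length : Int)).toNat 0 =
          (chip.drop (k * (mesh * mesh).toNat)).take (mesh * mesh).toNat := by
        rw [htile, htlen]
        have h0 : ((mesh * mesh) - (((mesh * mesh).toNat : Nat) : Int)).toNat = 0 := by omega
        rw [h0, List.replicate_zero, List.append_nil]
      rw [hvals, gridFull_eq_slices mesh hmesh _ (by rw [htlen])]
      rw [gridF, hpadarg]

-- ===== VERDICT support: the main equivalence =====

theorem main_equiv (mapping : List (List Int)) (mesh : Int) (hmesh : mesh ≠ 0) :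
    block_mapping mapping mesh = block_mapping_alt mapping mesh := by
  have hnt : 0 < mesh * mesh := mul_self_pos.mpr hmesh
  simp only [block_mapping, block_mapping_alt]
  rw [chipA_eq]
  have hc0 := foldl_rep_pair (PySem.List.enumerate mapping 0) []
  simp only [List.map_nil] at hc0
  rw [hc0, List.length_map]
  set chip := (PySem.List.enumerate mapping 0).foldl (fun chip p =>
    chip ++ List.replicate (PySem.List.pyGetD p.2 2 0).toNat (p.1 + 1)) [] with hchip
  set ppad := PySem.Int.mod (-(chip.length : Int)) (mesh * mesh) with hppad
  set nc := pyCeilDiv (chip.length : Int) (mesh * mesh) with hnc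
  have hfd := PySem.Int.floordiv_mul_add_mod (-(chip.length : Int)) (mesh * mesh)
  have hp0 : 0 ≤ ppad := PySem.Int.mod_nonneg _ hnt
  have hplt : ppad < mesh * mesh := PySem.Int.mod_lt _ hnt
  have hsum : nc * (mesh * mesh) = (chip.length : Int) + ppad := by
    rw [hnc]; unfold pyCeilDiv
    linear_combination -hfd
  have hnc0 : 0 ≤ nc := by
    by_contra h
    push_neg at h
    have hneg : nc * (mesh * mesh) < 0 := mul_neg_of_neg_of_pos h hnt
    omega
  have hB : (((mesh * mesh).toNat : Int)) = mesh * mesh := Int.toNat_of_nonneg hnt.le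
  have hm' : ((nc.toNat : Int)) = nc := Int.toNat_of_nonneg hnc0
  have hP : ((nc.toNat * (mesh * mesh).toNat : Nat) : Int) = (chip.length : Int) + ppad := by
    push_cast
    rw [hB, hm']
    exact hsum
  have hSlen : (chip.map (fun v => (v, true)) ++
      List.replicate ppad.toNat ((0 : Int), false)).length = nc.toNat * (mesh * mesh).toNat := by
    simp only [List.length_append, List.length_map, List.length_replicate]
    omega
  rw [feed_blocks mesh (mesh * mesh) hnt nc.toNat _ PySem.Dict.empty [] 0 hSlen]
  dsimp only
  rw [allA_eq_map, layoutA_items chip mesh (mesh * mesh) nc hnc0]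
  rw [insertAll_items, chunksW_eq_range, enum_range_map, List.map_map, List.nil_append]
  rw [PySem.List.pyRange_one 0 nc]
  simp only [Int.sub_zero, List.map_map, Prod.mk.injEq]
  constructor
  · apply List.map_congr_left
    intro k hk
    have hk' : k < nc.toNat := List.mem_range.mp hk
    have hbs := block_spec chip mesh hmesh nc ppad hp0 hplt hsum k hk'
    simp only [Function.comp_apply, zero_add, Prod.mk.injEq]
    exact ⟨by trivial, (hbs.2).symm⟩
  · apply List.map_congr_left
    intro k hk
    have hk' : k < nc.toNat := List.mem_range.mp hk
    have hbs := block_spec chip mesh hmesh nc ppad hp0 hplt hsum k hk'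
    simp only [Function.comp_apply, zero_add]
    exact (hbs.1).symm

-- ===== VERDICT (by name: the statement is the Claim_ definition above) =====
theorem block_mapping_spec : Claim_equal_block_mapping := by
  intro mapping mesh _ hpre
  unfold Spec_block_mapping
  exact main_equiv mapping mesh hpre.1
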